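-- pv_equiv track=rewrite | github.com/YoavTC/deco-plus | scripts/generate_recipes.py | numeric_to_pattern
-- ===== SOURCE A (Python) =====
-- def numeric_to_pattern(numeric_pattern, keys):
--     """Convert numeric pattern back to recipe pattern with keys"""
--     # Create mapping of numbers to keys
--     key_list = list(keys.keys())
--     num_to_key = {str(idx): key for idx, key in enumerate(key_list, 1)}
--     num_to_key['0'] = ' '
--
--     # Determine pattern dimensions based on length
--     pattern_length = len(numeric_pattern)
--     if pattern_length == 6:  # 2x3 pattern
--         rows = 2
--         cols = 3
--     elif pattern_length == 9:  # 3x3 pattern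
--         rows = 3
--         cols = 3
--     else:
--         # Try to infer dimensions
--         rows = (pattern_length + 2) // 3  # Round up division
--         cols = 3
--
--     # Convert numeric string to pattern
--     pattern = []
--     for i in range(rows):
--         row = ''
--         for j in range(cols):
--             idx = i * cols + j
--             if idx < len(numeric_pattern):
--                 row += num_to_key.get(numeric_pattern[idx], ' ')
--             else:
--                 row += ' '
--         pattern.append(row)
--
--     return pattern
-- ===== SOURCE B (Python) =====
-- def numeric_to_pattern(numeric_pattern, keys):
--     """Convert numeric pattern back to recipe pattern with keys"""
--     key_list = list(keys)
--
--     def cell(ch):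
--         # a digit 1..9 indexes directly into the key list; anything else is a blank
--         d = ord(ch) - 48
--         if 1 <= d <= 9 and d <= len(key_list):
--             return key_list[d - 1]
--         return ' '
--
--     # peel three characters off the front until the string is consumed; pad the last chunk
--     pattern = []
--     s = numeric_pattern
--     while s:
--         head, s = s[:3], s[3:]
--         row = ''.join(cell(ch) for ch in head)
--         pattern.append(row + ' ' * (3 - len(head)))
--     return pattern
-- ===== Notes on version B (the rewrite author's own statement) =====
-- stated objective: alternative
-- what changed: Drops A's str(idx)-keyed dict and nested row/column index loops entirely: each digit character indexes directly into the key list via ord(ch)-48, and the rows are built by a while loop that peels three characters off the front of the string and pads the final short chunk, so there is no rows/cols computation and no per-cell bounds arithmetic.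
import Mathlib
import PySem

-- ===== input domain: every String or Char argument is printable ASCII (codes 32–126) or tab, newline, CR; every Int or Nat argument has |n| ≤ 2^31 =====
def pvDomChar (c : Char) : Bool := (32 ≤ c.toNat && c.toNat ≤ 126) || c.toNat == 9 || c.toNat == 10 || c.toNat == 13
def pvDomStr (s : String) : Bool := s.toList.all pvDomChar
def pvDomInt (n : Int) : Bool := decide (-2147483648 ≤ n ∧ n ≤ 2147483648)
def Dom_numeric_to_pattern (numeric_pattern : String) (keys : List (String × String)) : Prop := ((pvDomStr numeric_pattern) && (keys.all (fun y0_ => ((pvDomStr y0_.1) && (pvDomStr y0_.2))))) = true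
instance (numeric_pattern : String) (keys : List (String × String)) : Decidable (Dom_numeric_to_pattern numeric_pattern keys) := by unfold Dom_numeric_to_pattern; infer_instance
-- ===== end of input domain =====

-- B drops A's str(idx)-keyed dict and the nested row/column loops: a digit indexes directly into
-- the key list, and rows come from a recursion peeling three characters at a time (alternative).

-- ===== PORT A =====
-- A's lines: num_to_key = {str(idx): key for idx, key in enumerate(keys.keys(), 1)}; num_to_key['0'] = ' '
def pvNumToKey (keys : List (String × String)) : PySem.Dict String String :=
  ((PySem.List.enumerate (keys.map (·.1)) 1).foldl
      (fun d p => d.insert (PySem.Int.toStr p.1) p.2) PySem.Dict.empty).insert "0" " "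

def numeric_to_pattern (numeric_pattern : String) (keys : List (String × String)) : List String :=
  let num_to_key := pvNumToKey keys
  let pattern_length : Int := PySem.Str.len numeric_pattern
  let rows : Int := if pattern_length = 6 then 2
                    else if pattern_length = 9 then 3
                    else PySem.Int.floordiv (pattern_length + 2) 3
  let cols : Int := 3
  (PySem.List.pyRange 0 rows 1).foldl (fun pattern i =>
    let row : String := (PySem.List.pyRange 0 cols 1).foldl (fun row j =>
      let idx := i * cols + j
      if idx < pattern_length then
        -- numeric_pattern[idx] is in range here; pyGet? returns some
        row ++ (match PySem.Str.pyGet? numeric_pattern idx with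
                | some c => num_to_key.getD (String.singleton c) " "
                | none => " ")
      else
        row ++ " ") ""
    pattern ++ [row]) []

-- ===== PORT B =====
-- B's cell(ch): d = ord(ch) - 48; key_list[d - 1] if 1 <= d <= 9 and d <= len(key_list) else ' '
def pvCellB (key_list : List String) (ch : Char) : String :=
  if 1 ≤ (ch.toNat : Int) - 48 ∧ (ch.toNat : Int) - 48 ≤ 9
       ∧ (ch.toNat : Int) - 48 ≤ (key_list.length : Int) then
    match PySem.List.pyGet? key_list ((ch.toNat : Int) - 48 - 1) with  -- in range under the guard
    | some k => k
    | none => " "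
  else " "

-- B's while loop: pattern = []; while s: head, s = s[:3], s[3:]; pattern.append(row padded).
-- The chunking head = s[:3] / tail = s[3:] is transcribed by matching up to three characters;
-- ' ' * k is ported as String.ofList (List.replicate k ' ')
def pvBuild (key_list : List String) (pattern : List String) : List Char → List String
  | [] => pattern
  | [a] =>
    pattern ++ [PySem.Str.join "" (([a]).map (pvCellB key_list))
                  ++ String.ofList (List.replicate (3 - ([a] : List Char).length) ' ')]
  | [a, b] =>
    pattern ++ [PySem.Str.join "" (([a, b]).map (pvCellB key_list))
                  ++ String.ofList (List.replicate (3 - ([a, b] : List Char).length) ' ')]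
  | a :: b :: c :: rest =>
    pvBuild key_list
      (pattern ++ [PySem.Str.join "" (([a, b, c]).map (pvCellB key_list))
                     ++ String.ofList (List.replicate (3 - ([a, b, c] : List Char).length) ' ')])
      rest

def numeric_to_pattern_alt (numeric_pattern : String) (keys : List (String × String)) : List String :=
  pvBuild (keys.map (·.1)) [] numeric_pattern.toList

-- ===== PRECONDITION & SPEC =====
def Spec_numeric_to_pattern (numeric_pattern : String) (keys : List (String × String)) (out : List String) : Prop := out = numeric_to_pattern_alt numeric_pattern keys
instance (numeric_pattern : String) (keys : List (String × String)) (out : List String) : Decidable (Spec_numeric_to_pattern numeric_pattern keys out) := by unfold Spec_numeric_to_pattern; infer_instance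

-- ===== CLAIM (what is proved, stated in full; the proofs are below) =====
def Claim_equal_numeric_to_pattern : Prop := ∀ (numeric_pattern : String) (keys : List (String × String)), Dom_numeric_to_pattern numeric_pattern keys → Spec_numeric_to_pattern numeric_pattern keys (numeric_to_pattern numeric_pattern keys)

-- ===== LEMMAS AND PROOFS =====

-- the cell value at flat index k as A computes it (blank past the end of the string)
def pvCell (d : PySem.Dict String String) (cs : List Char) (k : Nat) : String :=
  (cs[k]?.map (fun c => d.getD (String.singleton c) " ")).getD " "

-- the cell value at flat index k as B computes it
def pvCellL (kl : List String) (cs : List Char) (k : Nat) : String :=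
  (cs[k]?.map (pvCellB kl)).getD " "

theorem pv_fd (n : Nat) :
    PySem.Int.floordiv ((n : Int) + 2) 3 = (((n + 2) / 3 : Nat) : Int) := by
  simp [PySem.Int.floordiv, Int.fdiv_eq_ediv]
  try omega

theorem pv_step (row : String) (c : Prop) [Decidable c] (x : String) :
    (if c then row ++ x else row ++ " ") = row ++ (if c then x else " ") :=
  (apply_ite (row ++ ·) c x " ").symm

theorem pv_rows_eq (n : Nat) :
    (if ((n : Int)) = 6 then (2 : Int) else if (n : Int) = 9 then 3
     else PySem.Int.floordiv ((n : Int) + 2) 3) = (((n + 2) / 3 : Nat) : Int) := by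
  split_ifs with h6 h9 <;> [skip; skip; exact pv_fd n] <;> omega

theorem pv_cellA (d : PySem.Dict String String) (s : String) (m : Nat) :
    (if (m : Int) < ((s.toList.length : Nat) : Int) then
       (match PySem.Str.pyGet? s (m : Int) with
        | some c => d.getD (String.singleton c) " "
        | none => " ")
     else " ") = pvCell d s.toList m := by
  by_cases h : m < s.toList.length
  · rw [if_pos (by exact_mod_cast h), PySem.Str.pyGet?_natCast, List.getElem?_eq_getElem h]
    simp [pvCell, List.getElem?_eq_getElem h]
  · rw [if_neg (by exact_mod_cast h)]
    have hnone : s.toList[m]? = none := List.getElem?_eq_none (by omega)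
    simp [pvCell, hnone]

theorem pv_A_eq (s : String) (keys : List (String × String)) :
    numeric_to_pattern s keys =
      (List.range ((s.toList.length + 2) / 3)).map (fun k =>
        "" ++ pvCell (pvNumToKey keys) s.toList (3*k) ++ pvCell (pvNumToKey keys) s.toList (3*k+1)
           ++ pvCell (pvNumToKey keys) s.toList (3*k+2)) := by
  unfold numeric_to_pattern
  simp only [PySem.Str.len_eq, pv_rows_eq, PySem.List.pyRange_one]
  have h3 : List.map (fun k : Nat => (0 : Int) + (k : Int)) (List.range ((3 : Int) - 0).toNat)
      = [(0 : Int), 1, 2] := by decide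
  rw [PySem.List.foldl_append_singleton_eq_map, List.map_map]
  have hcnt : ((((s.toList.length + 2) / 3 : Nat) : Int) - 0).toNat = (s.toList.length + 2) / 3 := by
    omega
  rw [hcnt]
  simp only [List.nil_append]
  apply List.map_congr_left
  intro k hk
  simp only [Function.comp]
  rw [h3]
  simp only [List.foldl_cons, List.foldl_nil, pv_step]
  have e0 : (0 + (k : Int)) * 3 + 0 = ((3 * k : Nat) : Int) := by push_cast; ring
  have e1 : (0 + (k : Int)) * 3 + 1 = ((3 * k + 1 : Nat) : Int) := by push_cast; ring
  have e2 : (0 + (k : Int)) * 3 + 2 = ((3 * k + 2 : Nat) : Int) := by push_cast; ring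
  rw [e0, e1, e2, pv_cellA, pv_cellA, pv_cellA]

-- str(t) for 1 ≤ t is a one-char string exactly when t ≤ 9, and then the char is Char.ofNat (48+t)
theorem pv_toStr_singleton_iff (t : Nat) (c : Char) (ht : 1 ≤ t) :
    PySem.Int.toStr (t : Int) = String.singleton c ↔ (t ≤ 9 ∧ c = Char.ofNat (48 + t)) := by
  have hlist : (PySem.Int.toStr (t : Int)).toList = Nat.toDigits 10 t := by
    simp [PySem.Int.toStr, PySem.Int.toChars, show ¬((t : Int) < 0) by omega]
  constructor
  · intro h
    have h' := congrArg String.toList h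
    rw [hlist] at h'
    have h9 : t ≤ 9 := by
      by_contra h10
      have hrec : Nat.toDigits 10 t = Nat.toDigits 10 (t / 10) ++ [(t % 10).digitChar] :=
        (Nat.toDigits_eq_if (by norm_num)).trans (if_neg (by omega))
      have hne : Nat.toDigits 10 (t / 10) ≠ [] := by
        rw [Nat.toDigits_eq_if (by norm_num)]
        split <;> simp
      have hlen := congrArg List.length h'
      rw [hrec] at hlen
      simp at hlen
      exact hne hlen
    refine ⟨h9, ?_⟩
    rw [Nat.toDigits_of_lt_base (by omega)] at h'
    have hc : c = t.digitChar := by simpa using h'.symm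
    rw [hc]
    interval_cases t <;> decide
  · rintro ⟨h9, rfl⟩
    rw [← String.toList_inj, hlist, Nat.toDigits_of_lt_base (by omega)]
    interval_cases t <;> decide

-- lookup of a one-char key in the dict built by A's enumerate/str(idx) comprehension
theorem pv_fold_getD (c : Char) (kl : List String) (t : Nat) (ht : 1 ≤ t)
    (d0 : PySem.Dict String String) :
    ((PySem.List.enumerate kl ((t : Nat) : Int)).foldl
        (fun d p => d.insert (PySem.Int.toStr p.1) p.2) d0).getD (String.singleton c) " "
    = if 48 + t ≤ c.toNat ∧ c.toNat ≤ 57 ∧ c.toNat - 48 - t < kl.length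
      then kl.getD (c.toNat - 48 - t) " "
      else d0.getD (String.singleton c) " " := by
  induction kl generalizing t d0 with
  | nil =>
    rw [PySem.List.enumerate_nil]
    simp only [List.foldl_nil, List.length_nil]
    rw [if_neg (by omega)]
  | cons k rest ih =>
    rw [PySem.List.enumerate_cons]
    simp only [List.foldl_cons]
    rw [show ((t : Nat) : Int) + 1 = ((t + 1 : Nat) : Int) by push_cast; ring]
    rw [ih (t + 1) (by omega)]
    simp only [List.length_cons]
    by_cases hc : c.toNat = 48 + t ∧ t ≤ 9
    · obtain ⟨hc1, hc2⟩ := hc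
      have hceq : c = Char.ofNat (48 + t) := by rw [← hc1, Char.ofNat_toNat]
      have he : PySem.Int.toStr ((t : Nat) : Int) = String.singleton c :=
        (pv_toStr_singleton_iff t c ht).mpr ⟨hc2, hceq⟩
      rw [if_neg (by omega), he, PySem.Dict.getD_insert_self, if_pos (by omega)]
      have h0 : c.toNat - 48 - t = 0 := by omega
      rw [h0]
      simp [List.getD]
    · have hne : String.singleton c ≠ PySem.Int.toStr ((t : Nat) : Int) := by
        intro h
        rcases (pv_toStr_singleton_iff t c ht).mp h.symm with ⟨h9, rfl⟩
        refine hc ⟨?_, h9⟩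
        interval_cases t <;> decide
      rw [PySem.Dict.getD_insert_of_ne _ _ _ hne]
      by_cases h1 : 48 + (t + 1) ≤ c.toNat ∧ c.toNat ≤ 57 ∧ c.toNat - 48 - (t + 1) < rest.length
      · rw [if_pos h1, if_pos (by omega)]
        have hi : c.toNat - 48 - t = (c.toNat - 48 - (t + 1)) + 1 := by omega
        rw [hi]
        simp [List.getD]
      · rw [if_neg h1]
        by_cases h2 : 48 + t ≤ c.toNat ∧ c.toNat ≤ 57 ∧ c.toNat - 48 - t < rest.length + 1
        · exfalso
          exact hc ⟨by omega, by omega⟩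
        · rw [if_neg h2]

-- A's full dict lookup of a one-char key equals B's direct indexing
theorem pv_dict_bridge (keys : List (String × String)) (c : Char) :
    (pvNumToKey keys).getD (String.singleton c) " " = pvCellB (keys.map (·.1)) c := by
  unfold pvNumToKey pvCellB
  by_cases h0 : c = '0'
  · subst h0
    rw [show String.singleton '0' = "0" from rfl, PySem.Dict.getD_insert_self]
    rw [if_neg (by
      intro hcond
      obtain ⟨hc1, -, -⟩ := hcond
      have h48 : '0'.toNat = 48 := rfl
      omega)]
  · have hne : String.singleton c ≠ "0" := by
      intro h
      apply h0
      have h' := congrArg String.toList h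
      simpa using h'
    rw [PySem.Dict.getD_insert_of_ne _ _ _ hne]
    rw [show (1 : Int) = ((1 : Nat) : Int) from rfl, pv_fold_getD c _ 1 le_rfl]
    by_cases h1 : 48 + 1 ≤ c.toNat ∧ c.toNat ≤ 57 ∧ c.toNat - 48 - 1 < (keys.map (·.1)).length
    · rw [if_pos h1, if_pos (by push_cast; omega)]
      have hidx : ((c.toNat : Int) - 48 - ((1 : Nat) : Int)) = ((c.toNat - 48 - 1 : Nat) : Int) := by
        push_cast
        omega
      rw [hidx, PySem.List.pyGet?_natCast,
          List.getElem?_eq_getElem (show c.toNat - 48 - 1 < (keys.map (·.1)).length by omega)]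
      simp [List.getD_eq_getElem?_getD,
            List.getElem?_eq_getElem (show c.toNat - 48 - 1 < (keys.map (·.1)).length by omega)]
    · rw [if_neg h1, if_neg (by push_cast; omega)]
      simp [PySem.Dict.getD, PySem.Dict.get?, PySem.Dict.empty]

theorem pv_cell_bridge (keys : List (String × String)) (cs : List Char) (m : Nat) :
    pvCell (pvNumToKey keys) cs m = pvCellL (keys.map (·.1)) cs m := by
  cases h : cs[m]? <;> simp [pvCell, pvCellL, h, pv_dict_bridge]

set_option maxHeartbeats 1000000 in
theorem pv_B_build_aux (kl : List String) (n : Nat) : ∀ (cs : List Char), cs.length ≤ n →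
    ∀ (acc : List String),
    pvBuild kl acc cs = acc ++ (List.range ((cs.length + 2) / 3)).map (fun k =>
      "" ++ pvCellL kl cs (3*k) ++ pvCellL kl cs (3*k+1) ++ pvCellL kl cs (3*k+2)) := by
  induction n with
  | zero =>
    intro cs h acc
    have hnil : cs = [] := List.eq_nil_of_length_eq_zero (by omega)
    subst hnil
    simp [pvBuild]
  | succ n ih =>
    intro cs h acc
    rcases cs with _ | ⟨a, _ | ⟨b, _ | ⟨c2, rest⟩⟩⟩
    · simp [pvBuild]
    ·
      simp only [pvBuild]
      have hr : (([a] : List Char).length + 2) / 3 = 1 := by simp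
      rw [hr, List.range_one, List.map_singleton]
      refine congrArg (fun z => acc ++ ([z] : List String)) ?_
      rw [← String.toList_inj]
      simp [PySem.Str.toList_join, PySem.Chars.join, List.intercalate,
            pvCellL, List.replicate]
    ·
      simp only [pvBuild]
      have hr : (([a, b] : List Char).length + 2) / 3 = 1 := by simp
      rw [hr, List.range_one, List.map_singleton]
      refine congrArg (fun z => acc ++ ([z] : List String)) ?_
      rw [← String.toList_inj]
      simp [PySem.Str.toList_join, PySem.Chars.join, List.intercalate, List.intersperse,
            pvCellL]
    ·
      simp only [pvBuild]
      have hlen : (a :: b :: c2 :: rest).length = rest.length + 3 := by simp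
      rw [hlen]
      have hq : (rest.length + 3 + 2) / 3 = (rest.length + 2) / 3 + 1 := by omega
      rw [hq, List.range_succ_eq_map]
      simp only [List.map_cons, List.map_map]
      rw [ih rest (by simp at h; omega), List.append_assoc]
      refine congrArg (fun z => acc ++ z) ?_
      rw [List.singleton_append]
      refine congrArg₂ List.cons ?_ ?_
      · rw [← String.toList_inj]
        simp [PySem.Str.toList_join, PySem.Chars.join, List.intercalate, List.intersperse,
              pvCellL]
      · apply List.map_congr_left
        intro k hk
        simp only [Function.comp]
        have hsh : ∀ (m : Nat), pvCellL kl (a :: b :: c2 :: rest) (m + 3) = pvCellL kl rest m := by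
          intro m
          unfold pvCellL
          rw [show m + 3 = (m + 2) + 1 by omega, List.getElem?_cons_succ,
              show m + 2 = (m + 1) + 1 by omega, List.getElem?_cons_succ, List.getElem?_cons_succ]
        rw [show 3 * (k + 1) = 3 * k + 3 by ring]
        rw [show 3 * k + 3 + 1 = (3 * k + 1) + 3 by omega,
            show 3 * k + 3 + 2 = (3 * k + 2) + 3 by omega]
        rw [hsh, hsh, hsh]

theorem pv_B_eq (s : String) (keys : List (String × String)) :
    numeric_to_pattern_alt s keys =
      (List.range ((s.toList.length + 2) / 3)).map (fun k =>
        "" ++ pvCellL (keys.map (·.1)) s.toList (3*k) ++ pvCellL (keys.map (·.1)) s.toList (3*k+1)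
           ++ pvCellL (keys.map (·.1)) s.toList (3*k+2)) := by
  unfold numeric_to_pattern_alt
  rw [pv_B_build_aux (keys.map (·.1)) s.toList.length s.toList le_rfl []]
  rw [List.nil_append]

-- ===== VERDICT (by name: the statement is the Claim_ definition above) =====
theorem numeric_to_pattern_spec : Claim_equal_numeric_to_pattern := by
  intro s keys _
  unfold Spec_numeric_to_pattern
  rw [pv_A_eq, pv_B_eq]
  apply List.map_congr_left
  intro k _
  rw [pv_cell_bridge, pv_cell_bridge, pv_cell_bridge]
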